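-- pv_equiv track=rewrite | github.com/ErikGarfia/Analisis-de-Algoritmos | reinas.py | validacion
-- ===== SOURCE A (Python) =====
-- def validacion(reinas):
-- 	for i in range(8):
-- 		#Validación vertical
-- 		if(reinas[i].count(1)>1):
-- 			return False
-- 		#Validación horizontal
-- 		count = 0
-- 		countdia = 0
-- 		countdia2 = 0
-- 		diax = i-1
-- 		diay = -1
-- 		for j in range(8):
-- 			if(reinas[j][i]==1):
-- 				count += 1
-- 				if(count>1):
-- 					return False
-- 			if(diay<7 and diax<7):
-- 				if(reinas[diax+1][diay+1]==1):
-- 					countdia += 1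
-- 					if(countdia>1):
-- 						return False
-- 				if(reinas[diay+1][diax+1]==1):
-- 					countdia2 += 1
-- 					if(countdia2>1):
-- 						return False
-- 				diay += 1
-- 				diax += 1
--
-- 	for i in range(7,-1,-1):
-- 		countdia = 0
-- 		countdia2 = 0
-- 		diax = 8-i
-- 		diay = -1
-- 		for j in range(8):
-- 			if(diay<7 and diax>0):
-- 				if(reinas[diax-1][diay+1]==1):
-- 					countdia += 1
-- 					if(countdia>1):
-- 						return False
-- 				if(reinas[diay+1][diax-1]==1):
-- 					countdia2 += 1
-- 					if(countdia2>1):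
-- 						return False
-- 				diay += 1
-- 				diax -= 1
--
-- 	return True
-- ===== SOURCE B (Python) =====
-- def validacion(reinas):
--     cols = set()
--     diags = set()
--     antis = set()
--     for r in range(8):
--         fila = reinas[r]
--         if fila.count(1) > 1:
--             return False
--         for c, v in enumerate(fila[:8]):
--             if v == 1:
--                 if c in cols or r - c in diags or r + c in antis:
--                     return False
--                 cols.add(c)
--                 diags.add(r - c)
--                 antis.add(r + c)
--     return True
-- ===== Notes on version B (the rewrite author's own statement) =====
-- stated objective: simpler
-- what changed: Replaces the four hand-indexed diagonal/column counting walks (with diax/diay cursors) by a single pass over the board's cells that records each queen's column, r-c diagonal and r+c antidiagonal in three sets and reports a conflict on a duplicate key, keeping the per-row count(1) check.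
-- intended difference: On boards whose only conflict is two queens sharing an antidiagonal with row+col >= 8, A returns True because its second loop only walks the antidiagonals with sum 0..7 and never visits the high ones; B returns False, which is the intended validation of the board. — e.g. on validacion([[0,0,0,0,0,0,0,0],[0,0,0,0,0,0,0,1],[0,0,0,0,0,0,1,0],[0,0,0,0,0,0,0,0], [0,0,0,0,0,0,0,0],[0,0,0,0,0,0,0,0],[0,0,0,0,…): A returns true, B returns false
import Mathlib
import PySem

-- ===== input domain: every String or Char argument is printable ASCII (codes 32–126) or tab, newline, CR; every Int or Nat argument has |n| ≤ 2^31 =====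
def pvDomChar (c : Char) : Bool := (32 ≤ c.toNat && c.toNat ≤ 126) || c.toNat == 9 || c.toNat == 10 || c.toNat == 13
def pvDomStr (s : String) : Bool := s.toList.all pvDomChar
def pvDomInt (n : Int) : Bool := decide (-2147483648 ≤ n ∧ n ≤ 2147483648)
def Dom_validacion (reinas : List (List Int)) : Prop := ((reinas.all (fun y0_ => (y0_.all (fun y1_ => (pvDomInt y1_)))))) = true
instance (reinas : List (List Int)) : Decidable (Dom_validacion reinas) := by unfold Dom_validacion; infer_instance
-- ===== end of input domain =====

-- B replaces A's four hand-indexed counting walks by one pass over the 8x8 cells with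
-- three key sets (column, r-c, r+c); A misses the antidiagonals with r+c >= 8, B checks
-- them all (the D_ block below states this intended difference).

-- ===== PORT A =====
-- reinas[i] / reinas[r][c]; the .getD totalizes what Python raises IndexError on —
-- exact under Pre_validacion, which excludes the raising inputs.
def pvRow (m : List (List Int)) (i : Int) : List Int := (PySem.List.pyGet? m i).getD []
def pvCell (m : List (List Int)) (r c : Int) : Int := (PySem.List.pyGet? (pvRow m r) c).getD 0

-- inner 'for j in range(8)' of A's first loop, state (count, countdia, countdia2, diax, diay)
def aInner1 (m : List (List Int)) (i : Int) : List Int → Int → Int → Int → Int → Int → Bool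
  | [], _, _, _, _, _ => true
  | j :: js, count, cdia, cdia2, diax, diay =>
    let count' := if pvCell m j i = 1 then count + 1 else count
    if pvCell m j i = 1 ∧ 1 < count' then false
    else if diay < 7 ∧ diax < 7 then
      let cdia' := if pvCell m (diax + 1) (diay + 1) = 1 then cdia + 1 else cdia
      if pvCell m (diax + 1) (diay + 1) = 1 ∧ 1 < cdia' then false
      else
        let cdia2' := if pvCell m (diay + 1) (diax + 1) = 1 then cdia2 + 1 else cdia2
        if pvCell m (diay + 1) (diax + 1) = 1 ∧ 1 < cdia2' then false
        else aInner1 m i js count' cdia' cdia2' (diax + 1) (diay + 1)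
    else aInner1 m i js count' cdia cdia2 diax diay

-- A's first 'for i in range(8)'
def aLoop1 (m : List (List Int)) : List Int → Bool
  | [] => true
  | i :: is =>
    if 1 < PySem.List.count (pvRow m i) 1 then false
    else aInner1 m i (PySem.List.pyRange 0 8 1) 0 0 0 (i - 1) (-1) && aLoop1 m is

-- inner 'for j in range(8)' of A's second loop, state (countdia, countdia2, diax, diay)
def aInner2 (m : List (List Int)) : List Int → Int → Int → Int → Int → Bool
  | [], _, _, _, _ => true
  | _ :: js, cdia, cdia2, diax, diay =>
    if diay < 7 ∧ 0 < diax then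
      let cdia' := if pvCell m (diax - 1) (diay + 1) = 1 then cdia + 1 else cdia
      if pvCell m (diax - 1) (diay + 1) = 1 ∧ 1 < cdia' then false
      else
        let cdia2' := if pvCell m (diay + 1) (diax - 1) = 1 then cdia2 + 1 else cdia2
        if pvCell m (diay + 1) (diax - 1) = 1 ∧ 1 < cdia2' then false
        else aInner2 m js cdia' cdia2' (diax - 1) (diay + 1)
    else aInner2 m js cdia cdia2 diax diay

-- A's 'for i in range(7,-1,-1)'
def aLoop2 (m : List (List Int)) : List Int → Bool
  | [] => true
  | i :: is => aInner2 m (PySem.List.pyRange 0 8 1) 0 0 (8 - i) (-1) && aLoop2 m is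

def validacion (reinas : List (List Int)) : Bool :=
  aLoop1 reinas (PySem.List.pyRange 0 8 1) && aLoop2 reinas (PySem.List.pyRange 7 (-1) (-1))

-- ===== PORT B =====
-- inner 'for c, v in enumerate(fila[:8])' of B: sets cols/diags/antis; none = 'return False'
def bInner (r : Int) :
    List (Int × Int) → PySem.Set Int → PySem.Set Int → PySem.Set Int →
    Option (PySem.Set Int × PySem.Set Int × PySem.Set Int)
  | [], cols, dias, antis => some (cols, dias, antis)
  | (c, v) :: cs, cols, dias, antis =>
    if v = 1 then
      if PySem.Set.contains cols c || PySem.Set.contains dias (r - c) ||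
          PySem.Set.contains antis (r + c) then none
      else bInner r cs (PySem.Set.add cols c) (PySem.Set.add dias (r - c))
            (PySem.Set.add antis (r + c))
    else bInner r cs cols dias antis

-- B's 'for r in range(8)'; fila = reinas[r] (the .getD [] totalizes the IndexError,
-- exact under Pre_validacion); fila[:8] is PySem.List.slice
def bOuter (m : List (List Int)) : List Int → PySem.Set Int → PySem.Set Int → PySem.Set Int → Bool
  | [], _, _, _ => true
  | r :: rs, cols, dias, antis =>
    if 1 < PySem.List.count (pvRow m r) 1 then false
    else match bInner r (PySem.List.enumerate (PySem.List.slice (pvRow m r) none (some 8)) 0)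
        cols dias antis with
      | none => false
      | some (cols', dias', antis') => bOuter m rs cols' dias' antis'

def validacion_alt (reinas : List (List Int)) : Bool :=
  bOuter reinas (PySem.List.pyRange 0 8 1) PySem.Set.empty PySem.Set.empty PySem.Set.empty

-- ===== PRECONDITION & SPEC =====
-- Pre_ admits the proper 8x8 boards, the boards whose first row already holds two queens,
-- and the boards on which A's first column/diagonal walk meets a second queen (returning
-- False) before touching any missing cell. It excludes the remaining degenerate shapes:
-- there the 8x8 indexing raises IndexError in Python A, except for a few boards on which
-- A still exits False inside a later walk (B returns False there too; see the cite).
def Pre_validacion (reinas : List (List Int)) : Prop :=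
  (8 ≤ reinas.length ∧ ∀ fila ∈ reinas.take 8, 8 ≤ fila.length) ∨
  1 < (reinas.head?.getD []).count 1 ∨
  ∃ j < 8, j < reinas.length ∧ (∀ k < j, k + 1 ≤ (reinas[k]?.getD []).length) ∧
    1 ≤ (reinas[j]?.getD []).length ∧
    (((reinas[j]?.getD [])[0]?.getD 0 = 1 ∧ ∃ k < j, (reinas[k]?.getD [])[0]?.getD 0 = 1) ∨
      (j + 1 ≤ (reinas[j]?.getD []).length ∧ (reinas[j]?.getD [])[j]?.getD 0 = 1 ∧
        ∃ k < j, (reinas[k]?.getD [])[k]?.getD 0 = 1))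
instance (reinas : List (List Int)) : Decidable (Pre_validacion reinas) := by
  unfold Pre_validacion; infer_instance

def pvWitness_validacion : List (List Int) :=
  [[0,0,0,0,0,0,0,0],[0,0,0,0,0,0,0,0],[0,0,0,0,0,0,0,0],[0,0,0,0,0,0,0,0],
   [0,0,0,0,0,0,0,0],[0,0,0,0,0,0,0,0],[0,0,0,0,0,0,0,0],[0,0,0,0,0,0,0,0]]

-- the queen cells (value 1) of the 8x8 board, row-major
def pvQs (m : List (List Int)) : List (Int × Int) :=
  ((PySem.List.pyRange 0 8 1).product (PySem.List.pyRange 0 8 1)).filter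
    fun p => pvCell m p.1 p.2 == 1

-- On boards whose only conflict is two queens sharing an antidiagonal with row+col ≥ 8,
-- A returns True (its second loop only walks the antidiagonals with sum 0..7); B returns
-- False, the intended verdict for a board with attacking queens.
def D_validacion (reinas : List (List Int)) : Prop :=
  (∀ f ∈ reinas.take 8, f.count 1 ≤ 1) ∧
  (pvQs reinas).Pairwise (fun p q =>
    p.2 ≠ q.2 ∧ p.1 + q.2 ≠ q.1 + p.2 ∧ (p.1 + p.2 ≠ q.1 + q.2 ∨ 8 ≤ p.1 + p.2)) ∧
  ¬ (pvQs reinas).Pairwise (fun p q => p.1 + p.2 ≠ q.1 + q.2)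
instance (reinas : List (List Int)) : Decidable (D_validacion reinas) := by
  unfold D_validacion; infer_instance

def Spec_validacion (reinas : List (List Int)) (out : Bool) : Prop :=
  ¬ D_validacion reinas → out = validacion_alt reinas
instance (reinas : List (List Int)) (out : Bool) : Decidable (Spec_validacion reinas out) := by
  unfold Spec_validacion; infer_instance

def pvDiffWitness_validacion : List (List Int) :=
  [[0,0,0,0,0,0,0,0],[0,0,0,0,0,0,0,1],[0,0,0,0,0,0,1,0],[0,0,0,0,0,0,0,0],
   [0,0,0,0,0,0,0,0],[0,0,0,0,0,0,0,0],[0,0,0,0,0,0,0,0],[0,0,0,0,0,0,0,0]]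
def pvDiffWitnessOut_validacion : Bool × Bool := (true, false)

-- ===== CLAIM (what is proved, stated in full; the proofs are below) =====
def Claim_unchanged_validacion : Prop := ∀ (reinas : List (List Int)), Dom_validacion reinas →
  Pre_validacion reinas → Spec_validacion reinas (validacion reinas)
def Claim_changed_validacion : Prop := Dom_validacion (pvDiffWitness_validacion) ∧
  Pre_validacion (pvDiffWitness_validacion) ∧ D_validacion (pvDiffWitness_validacion) ∧
  validacion (pvDiffWitness_validacion) = pvDiffWitnessOut_validacion.1 ∧
  validacion_alt (pvDiffWitness_validacion) = pvDiffWitnessOut_validacion.2 ∧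
  pvDiffWitnessOut_validacion.1 ≠ pvDiffWitnessOut_validacion.2
def Claim_exact_validacion : Prop := ∀ (reinas : List (List Int)), Dom_validacion reinas →
  Pre_validacion reinas → D_validacion reinas → validacion reinas ≠ validacion_alt reinas

-- ===== LEMMAS AND PROOFS =====

def pvR8 : List Int := [0, 1, 2, 3, 4, 5, 6, 7]
def pvCells : List (Int × Int) := pvR8.flatMap (fun r => pvR8.map (fun c => (r, c)))
def pvQueen (m : List (List Int)) (p : Int × Int) : Prop := pvCell m p.1 p.2 = 1
def pvPairConf (m : List (List Int)) (g : Int × Int → Int) (lo hi : Int) : Prop :=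
  ∃ p ∈ pvCells, ∃ q ∈ pvCells, p ≠ q ∧ pvQueen m p ∧ pvQueen m q ∧ g p = g q ∧
    lo ≤ g p ∧ g p ≤ hi

-- cell lists walked by A's diagonal cursors (proof-side mirrors of the walks)
def pvDiaCells : List Int → Int → Int → List (Int × Int)
  | [], _, _ => []
  | _ :: js, dx, dy =>
    if dy < 7 ∧ dx < 7 then (dx + 1, dy + 1) :: pvDiaCells js (dx + 1) (dy + 1)
    else pvDiaCells js dx dy

def pvAntiCells : List Int → Int → Int → List (Int × Int)
  | [], _, _ => []
  | _ :: js, dx, dy =>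
    if dy < 7 ∧ 0 < dx then (dx - 1, dy + 1) :: pvAntiCells js (dx - 1) (dy + 1)
    else pvAntiCells js dx dy

def pvColCells (i : Int) : List (Int × Int) := (PySem.List.pyRange 0 8 1).map (fun j => (j, i))
def pvD1 (i : Int) : List (Int × Int) := pvDiaCells (PySem.List.pyRange 0 8 1) (i - 1) (-1)
def pvA1 (i : Int) : List (Int × Int) := pvAntiCells (PySem.List.pyRange 0 8 1) (8 - i) (-1)

def pvHits (m : List (List Int)) : List (Int × Int) → Int
  | [] => 0
  | p :: ps => (if pvCell m p.1 p.2 = 1 then 1 else 0) + pvHits m ps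

def pvClash (p q : Int × Int) : Prop :=
  p.2 = q.2 ∨ p.1 - p.2 = q.1 - q.2 ∨ p.1 + p.2 = q.1 + q.2

def pvRowCnt (m : List (List Int)) : Prop := ∃ r ∈ pvR8, 1 < PySem.List.count (pvRow m r) 1

def pvRowConf (m : List (List Int)) : Prop := ∃ f ∈ m.take 8, 1 < f.count 1

def pvX (m : List (List Int)) : Prop :=
  pvRowCnt m ∨ pvPairConf m Prod.snd 0 7 ∨
    pvPairConf m (fun p => p.1 - p.2) (-7) 7 ∨ pvPairConf m (fun p => p.1 + p.2) 0 7

theorem pvHits_nonneg (m : List (List Int)) (l : List (Int × Int)) : 0 ≤ pvHits m l := by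
  induction l with
  | nil => simp [pvHits]
  | cons p ps ih => simp only [pvHits]; split_ifs <;> omega

theorem pvHits_pos_iff (m : List (List Int)) (l : List (Int × Int)) :
    0 < pvHits m l ↔ ∃ p ∈ l, pvQueen m p := by
  induction l with
  | nil => simp [pvHits]
  | cons p ps ih =>
    have := pvHits_nonneg m ps
    simp only [pvHits, List.mem_cons]
    constructor
    · intro h
      by_cases hq : pvCell m p.1 p.2 = 1
      · exact ⟨p, Or.inl rfl, hq⟩
      · simp [hq] at h
        obtain ⟨q, hq1, hq2⟩ := ih.mp h
        exact ⟨q, Or.inr hq1, hq2⟩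
    · rintro ⟨q, (rfl | hq1), hq2⟩
      · simp [pvQueen] at hq2; simp [hq2]; omega
      · have := ih.mpr ⟨q, hq1, hq2⟩
        split_ifs <;> omega

theorem one_lt_pvHits_iff (m : List (List Int)) (l : List (Int × Int)) (hnd : l.Nodup) :
    1 < pvHits m l ↔ ∃ p ∈ l, ∃ q ∈ l, p ≠ q ∧ pvQueen m p ∧ pvQueen m q := by
  induction l with
  | nil => simp [pvHits]
  | cons p ps ih =>
    obtain ⟨hp, hnd'⟩ := List.nodup_cons.mp hnd
    have h0 := pvHits_nonneg m ps
    simp only [pvHits, List.mem_cons]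
    by_cases hq : pvCell m p.1 p.2 = 1
    · simp only [hq, if_pos]
      constructor
      · intro h
        have : 0 < pvHits m ps := by omega
        obtain ⟨q, hq1, hq2⟩ := (pvHits_pos_iff m ps).mp this
        exact ⟨p, Or.inl rfl, q, Or.inr hq1, fun he => hp (he ▸ hq1), hq, hq2⟩
      · rintro ⟨a, (rfl | ha), b, (rfl | hb), hne, hqa, hqb⟩
        · exact absurd rfl hne
        · have : 0 < pvHits m ps := (pvHits_pos_iff m ps).mpr ⟨b, hb, hqb⟩; omega
        · have : 0 < pvHits m ps := (pvHits_pos_iff m ps).mpr ⟨a, ha, hqa⟩; omega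
        · have : 1 < pvHits m ps := (ih hnd').mpr ⟨a, ha, b, hb, hne, hqa, hqb⟩; omega
    · simp only [hq, if_neg, not_false_iff, zero_add]
      rw [ih hnd']
      constructor
      · rintro ⟨a, ha, b, hb, hne, hqa, hqb⟩
        exact ⟨a, Or.inr ha, b, Or.inr hb, hne, hqa, hqb⟩
      · rintro ⟨a, (rfl | ha), b, (rfl | hb), hne, hqa, hqb⟩
        · exact absurd rfl hne
        · exact absurd hqa hq
        · exact absurd hqb hq
        · exact ⟨a, ha, b, hb, hne, hqa, hqb⟩

theorem aInner1_false_iff (m : List (List Int)) (i : Int) :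
    ∀ (js : List Int) (count cdia cdia2 dx dy : Int), count ≤ 1 → cdia ≤ 1 → cdia2 ≤ 1 →
    (aInner1 m i js count cdia cdia2 dx dy = false ↔
      1 < count + pvHits m (js.map (fun j => (j, i))) ∨
      1 < cdia + pvHits m (pvDiaCells js dx dy) ∨
      1 < cdia2 + pvHits m ((pvDiaCells js dx dy).map Prod.swap)) := by
  intro js
  induction js with
  | nil =>
    intro count cdia cdia2 dx dy h1 h2 h3
    simp [aInner1, pvDiaCells, pvHits]
    omega
  | cons j js ih =>
    intro count cdia cdia2 dx dy h1 h2 h3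
    by_cases hq : pvCell m j i = 1 <;>
      by_cases hg : dy < 7 ∧ dx < 7 <;>
        simp only [aInner1, pvDiaCells, hq, hg, if_true, if_false, ite_true, ite_false,
          if_pos, if_neg, not_false_iff, List.map_cons, pvHits, Prod.swap_prod_mk, true_and,
          false_and, and_true, and_false, List.map]
    case pos =>
      -- hq true, hg true
      by_cases hc : (1:Int) < count + 1 <;> simp only [hc, if_true, if_false, ite_true, ite_false]
      · have := pvHits_nonneg m (js.map (fun j => (j, i)))
        simp only [true_iff]
        left; omega
      · by_cases hd1 : pvCell m (dx + 1) (dy + 1) = 1 <;>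
          simp only [hd1, if_true, if_false, ite_true, ite_false, true_and, false_and]
        · by_cases he1 : (1:Int) < cdia + 1 <;> simp only [he1, if_true, if_false, ite_true, ite_false]
          · have := pvHits_nonneg m (pvDiaCells js (dx+1) (dy+1))
            simp only [true_iff]; right; left; omega
          · by_cases hd2 : pvCell m (dy + 1) (dx + 1) = 1 <;>
              simp only [hd2, if_true, if_false, ite_true, ite_false, true_and, false_and]
            · by_cases he2 : (1:Int) < cdia2 + 1 <;>
                simp only [he2, if_true, if_false, ite_true, ite_false]
              · have := pvHits_nonneg m ((pvDiaCells js (dx+1) (dy+1)).map Prod.swap)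
                simp only [true_iff]; right; right; omega
              · rw [ih (count+1) (cdia+1) (cdia2+1) (dx+1) (dy+1) (by omega) (by omega) (by omega)]
                generalize pvHits m (js.map (fun j => (j, i))) = a
                generalize pvHits m (pvDiaCells js (dx+1) (dy+1)) = b
                generalize pvHits m ((pvDiaCells js (dx+1) (dy+1)).map Prod.swap) = c
                omega
            · rw [ih (count+1) (cdia+1) cdia2 (dx+1) (dy+1) (by omega) (by omega) (by omega)]
              generalize pvHits m (js.map (fun j => (j, i))) = a
              generalize pvHits m (pvDiaCells js (dx+1) (dy+1)) = b
              generalize pvHits m ((pvDiaCells js (dx+1) (dy+1)).map Prod.swap) = c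
              omega
        · by_cases hd2 : pvCell m (dy + 1) (dx + 1) = 1 <;>
            simp only [hd2, if_true, if_false, ite_true, ite_false, true_and, false_and]
          · by_cases he2 : (1:Int) < cdia2 + 1 <;>
              simp only [he2, if_true, if_false, ite_true, ite_false]
            · have := pvHits_nonneg m ((pvDiaCells js (dx+1) (dy+1)).map Prod.swap)
              simp only [true_iff]; right; right; omega
            · rw [ih (count+1) cdia (cdia2+1) (dx+1) (dy+1) (by omega) (by omega) (by omega)]
              generalize pvHits m (js.map (fun j => (j, i))) = a
              generalize pvHits m (pvDiaCells js (dx+1) (dy+1)) = b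
              generalize pvHits m ((pvDiaCells js (dx+1) (dy+1)).map Prod.swap) = c
              omega
          · rw [ih (count+1) cdia cdia2 (dx+1) (dy+1) (by omega) (by omega) (by omega)]
            generalize pvHits m (js.map (fun j => (j, i))) = a
            generalize pvHits m (pvDiaCells js (dx+1) (dy+1)) = b
            generalize pvHits m ((pvDiaCells js (dx+1) (dy+1)).map Prod.swap) = c
            omega
    case neg =>
      -- hq true, hg false
      by_cases hc : (1:Int) < count + 1 <;> simp only [hc, if_true, if_false, ite_true, ite_false]
      · have := pvHits_nonneg m (js.map (fun j => (j, i)))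
        simp only [true_iff]; left; omega
      · rw [ih (count+1) cdia cdia2 dx dy (by omega) h2 h3]
        generalize pvHits m (js.map (fun j => (j, i))) = a
        omega
    case pos =>
      -- hq false, hg true
      by_cases hd1 : pvCell m (dx + 1) (dy + 1) = 1 <;>
        simp only [hd1, if_true, if_false, ite_true, ite_false, true_and, false_and]
      · by_cases he1 : (1:Int) < cdia + 1 <;> simp only [he1, if_true, if_false, ite_true, ite_false]
        · have := pvHits_nonneg m (pvDiaCells js (dx+1) (dy+1))
          simp only [true_iff]; right; left; omega
        · by_cases hd2 : pvCell m (dy + 1) (dx + 1) = 1 <;>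
            simp only [hd2, if_true, if_false, ite_true, ite_false, true_and, false_and]
          · by_cases he2 : (1:Int) < cdia2 + 1 <;>
              simp only [he2, if_true, if_false, ite_true, ite_false]
            · have := pvHits_nonneg m ((pvDiaCells js (dx+1) (dy+1)).map Prod.swap)
              simp only [true_iff]; right; right; omega
            · rw [ih count (cdia+1) (cdia2+1) (dx+1) (dy+1) h1 (by omega) (by omega)]
              generalize pvHits m (js.map (fun j => (j, i))) = a
              generalize pvHits m (pvDiaCells js (dx+1) (dy+1)) = b
              generalize pvHits m ((pvDiaCells js (dx+1) (dy+1)).map Prod.swap) = c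
              omega
          · rw [ih count (cdia+1) cdia2 (dx+1) (dy+1) h1 (by omega) h3]
            generalize pvHits m (js.map (fun j => (j, i))) = a
            generalize pvHits m (pvDiaCells js (dx+1) (dy+1)) = b
            generalize pvHits m ((pvDiaCells js (dx+1) (dy+1)).map Prod.swap) = c
            omega
      · by_cases hd2 : pvCell m (dy + 1) (dx + 1) = 1 <;>
          simp only [hd2, if_true, if_false, ite_true, ite_false, true_and, false_and]
        · by_cases he2 : (1:Int) < cdia2 + 1 <;>
            simp only [he2, if_true, if_false, ite_true, ite_false]
          · have := pvHits_nonneg m ((pvDiaCells js (dx+1) (dy+1)).map Prod.swap)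
            simp only [true_iff]; right; right; omega
          · rw [ih count cdia (cdia2+1) (dx+1) (dy+1) h1 h2 (by omega)]
            generalize pvHits m (js.map (fun j => (j, i))) = a
            generalize pvHits m (pvDiaCells js (dx+1) (dy+1)) = b
            generalize pvHits m ((pvDiaCells js (dx+1) (dy+1)).map Prod.swap) = c
            omega
        · rw [ih count cdia cdia2 (dx+1) (dy+1) h1 h2 h3]
          generalize pvHits m (js.map (fun j => (j, i))) = a
          omega
    case neg =>
      -- hq false, hg false
      rw [ih count cdia cdia2 dx dy h1 h2 h3]
      generalize pvHits m (js.map (fun j => (j, i))) = a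
      omega

theorem aInner2_false_iff (m : List (List Int)) :
    ∀ (js : List Int) (cdia cdia2 dx dy : Int), cdia ≤ 1 → cdia2 ≤ 1 →
    (aInner2 m js cdia cdia2 dx dy = false ↔
      1 < cdia + pvHits m (pvAntiCells js dx dy) ∨
      1 < cdia2 + pvHits m ((pvAntiCells js dx dy).map Prod.swap)) := by
  intro js
  induction js with
  | nil =>
    intro cdia cdia2 dx dy h2 h3
    simp [aInner2, pvAntiCells, pvHits]
    omega
  | cons j js ih =>
    intro cdia cdia2 dx dy h2 h3
    by_cases hg : dy < 7 ∧ 0 < dx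
    case pos =>
      by_cases hd1 : pvCell m (dx - 1) (dy + 1) = 1
      · by_cases he1 : (1:Int) < cdia + 1
        · have := pvHits_nonneg m (pvAntiCells js (dx-1) (dy+1))
          simp only [aInner2, pvAntiCells, hg, hd1, he1, if_pos, true_and, if_true, true_iff]
          left
          simp [pvHits, hd1]
          omega
        · by_cases hd2 : pvCell m (dy + 1) (dx - 1) = 1
          · by_cases he2 : (1:Int) < cdia2 + 1
            · have := pvHits_nonneg m ((pvAntiCells js (dx-1) (dy+1)).map Prod.swap)
              simp only [aInner2, pvAntiCells, hg, hd1, he1, hd2, he2, if_pos, true_and,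
                if_true, if_false, true_iff]
              right
              simp [pvHits, hd2]
              omega
            · have hr := ih (cdia+1) (cdia2+1) (dx-1) (dy+1) (by omega) (by omega)
              simp only [aInner2, pvAntiCells, hg, hd1, he1, hd2, he2, if_pos, true_and, if_true]
              simp only [he1, he2, if_false]
              rw [hr]
              simp [pvHits, hd1, hd2]
              generalize pvHits m (pvAntiCells js (dx-1) (dy+1)) = b
              generalize pvHits m ((pvAntiCells js (dx-1) (dy+1)).map Prod.swap) = c
              omega
          · have hr := ih (cdia+1) cdia2 (dx-1) (dy+1) (by omega) h3
            simp only [aInner2, pvAntiCells, hg, hd1, he1, hd2, if_pos, true_and, if_true]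
            simp only [he1, hd2, if_false, false_and]
            rw [hr]
            simp [pvHits, hd1, hd2]
            generalize pvHits m (pvAntiCells js (dx-1) (dy+1)) = b
            generalize pvHits m ((pvAntiCells js (dx-1) (dy+1)).map Prod.swap) = c
            omega
      · by_cases hd2 : pvCell m (dy + 1) (dx - 1) = 1
        · by_cases he2 : (1:Int) < cdia2 + 1
          · have := pvHits_nonneg m ((pvAntiCells js (dx-1) (dy+1)).map Prod.swap)
            simp only [aInner2, pvAntiCells, hg, hd1, hd2, he2, if_pos, true_and, if_true,
              if_false, false_and, true_iff]
            right
            simp [pvHits, hd2]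
            omega
          · have hr := ih cdia (cdia2+1) (dx-1) (dy+1) h2 (by omega)
            simp only [aInner2, pvAntiCells, hg, hd1, hd2, he2, if_pos, true_and, if_true,
              if_false, false_and]
            rw [hr]
            simp [pvHits, hd1, hd2]
            generalize pvHits m (pvAntiCells js (dx-1) (dy+1)) = b
            generalize pvHits m ((pvAntiCells js (dx-1) (dy+1)).map Prod.swap) = c
            omega
        · have hr := ih cdia cdia2 (dx-1) (dy+1) h2 h3
          have hl : aInner2 m (j::js) cdia cdia2 dx dy = aInner2 m js cdia cdia2 (dx-1) (dy+1) := by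
            simp [aInner2, hg, hd1, hd2]
          rw [hl, hr]
          simp [pvAntiCells, hg, pvHits, hd1, hd2]
    case neg =>
      have hr := ih cdia cdia2 dx dy h2 h3
      simp only [aInner2, pvAntiCells, hg, if_neg, not_false_iff, if_false]
      exact hr

theorem aLoop1_false_iff (m : List (List Int)) :
    ∀ (is : List Int), aLoop1 m is = false ↔
      ∃ i ∈ is, 1 < PySem.List.count (pvRow m i) 1 ∨
        1 < pvHits m (pvColCells i) ∨ 1 < pvHits m (pvD1 i) ∨
        1 < pvHits m ((pvD1 i).map Prod.swap) := by
  intro is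
  induction is with
  | nil => simp [aLoop1]
  | cons i is ih =>
    by_cases hr : 1 < PySem.List.count (pvRow m i) 1
    · simp only [aLoop1, hr, if_pos, List.mem_cons, true_iff]
      exact ⟨i, Or.inl rfl, Or.inl hr⟩
    · simp only [aLoop1, hr, if_neg, not_false_iff, List.mem_cons, if_false,
        Bool.and_eq_false_iff]
      have hin := aInner1_false_iff m i (PySem.List.pyRange 0 8 1) 0 0 0 (i-1) (-1)
        (by omega) (by omega) (by omega)
      simp only [zero_add] at hin
      rw [hin, ih]
      constructor
      · rintro (h | ⟨a, ha, hc⟩)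
        · exact ⟨i, Or.inl rfl, Or.inr (by simpa [pvColCells, pvD1] using h)⟩
        · exact ⟨a, Or.inr ha, hc⟩
      · rintro ⟨a, (rfl | ha), hc⟩
        · rcases hc with h | h
          · exact absurd h hr
          · exact Or.inl (by simpa [pvColCells, pvD1] using h)
        · exact Or.inr ⟨a, ha, hc⟩

theorem aLoop2_false_iff (m : List (List Int)) :
    ∀ (is : List Int), aLoop2 m is = false ↔
      ∃ i ∈ is, 1 < pvHits m (pvA1 i) ∨ 1 < pvHits m ((pvA1 i).map Prod.swap) := by
  intro is
  induction is with
  | nil => simp [aLoop2]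
  | cons i is ih =>
    simp only [aLoop2, List.mem_cons, Bool.and_eq_false_iff]
    have hin := aInner2_false_iff m (PySem.List.pyRange 0 8 1) 0 0 (8-i) (-1)
      (by omega) (by omega)
    simp only [zero_add] at hin
    rw [hin, ih]
    constructor
    · rintro (h | ⟨a, ha, hc⟩)
      · exact ⟨i, Or.inl rfl, by simpa [pvA1] using h⟩
      · exact ⟨a, Or.inr ha, hc⟩
    · rintro ⟨a, (rfl | ha), hc⟩
      · exact Or.inl (by simpa [pvA1] using hc)
      · exact Or.inr ⟨a, ha, hc⟩

theorem mem_pvR8 (i : Int) : i ∈ pvR8 ↔ 0 ≤ i ∧ i ≤ 7 := by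
  simp [pvR8]
  omega

theorem mem_pvCells (p : Int × Int) : p ∈ pvCells ↔ p.1 ∈ pvR8 ∧ p.2 ∈ pvR8 := by
  obtain ⟨a, b⟩ := p
  simp only [pvCells, List.mem_flatMap, List.mem_map, Prod.mk.injEq]
  constructor
  · rintro ⟨r, hr, c, hc, rfl, rfl⟩; exact ⟨hr, hc⟩
  · rintro ⟨ha, hb⟩; exact ⟨a, ha, b, hb, rfl, rfl⟩

theorem dec_col : ∀ i ∈ pvR8, (pvColCells i).Nodup ∧
    ∀ p ∈ pvColCells i, p ∈ pvCells ∧ p.2 = i := by decide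
theorem dec_d1 : ∀ i ∈ pvR8, (pvD1 i).Nodup ∧
    ∀ p ∈ pvD1 i, p ∈ pvCells ∧ p.1 - p.2 = i := by decide
theorem dec_d1s : ∀ i ∈ pvR8, ((pvD1 i).map Prod.swap).Nodup ∧
    ∀ p ∈ (pvD1 i).map Prod.swap, p ∈ pvCells ∧ p.1 - p.2 = -i := by decide
theorem dec_a1 : ∀ i ∈ pvR8, (pvA1 i).Nodup ∧
    ∀ p ∈ pvA1 i, p ∈ pvCells ∧ p.1 + p.2 = 7 - i := by decide
theorem dec_a1s : ∀ i ∈ pvR8, ((pvA1 i).map Prod.swap).Nodup ∧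
    ∀ p ∈ (pvA1 i).map Prod.swap, p ∈ pvCells ∧ p.1 + p.2 = 7 - i := by decide
theorem dec_bounds : ∀ p ∈ pvCells, 0 ≤ p.1 ∧ p.1 ≤ 7 ∧ 0 ≤ p.2 ∧ p.2 ≤ 7 := by decide
theorem dec_mem_col : ∀ p ∈ pvCells, p ∈ pvColCells p.2 := by decide
theorem dec_mem_d1 : ∀ p ∈ pvCells, (0 ≤ p.1 - p.2 → p ∈ pvD1 (p.1 - p.2)) ∧
    (p.1 - p.2 < 0 → p ∈ (pvD1 (p.2 - p.1)).map Prod.swap) := by decide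
theorem dec_mem_a1 : ∀ p ∈ pvCells, p.1 + p.2 ≤ 7 → p ∈ pvA1 (7 - (p.1 + p.2)) := by decide

theorem pyR8 : PySem.List.pyRange 0 8 1 = pvR8 := by decide
theorem pyR8rev : PySem.List.pyRange 7 (-1) (-1) = [7, 6, 5, 4, 3, 2, 1, 0] := by decide
theorem mem_rev (i : Int) : i ∈ ([7, 6, 5, 4, 3, 2, 1, 0] : List Int) ↔ i ∈ pvR8 := by
  simp [pvR8]
  omega

theorem validacion_false_iff (m : List (List Int)) : validacion m = false ↔ pvX m := by
  unfold validacion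
  rw [Bool.and_eq_false_iff, aLoop1_false_iff, aLoop2_false_iff, pyR8, pyR8rev]
  unfold pvX pvRowCnt pvPairConf
  constructor
  · rintro (⟨i, hi, hc⟩ | ⟨i, hi, hc⟩)
    · rcases hc with h | h | h | h
      · exact Or.inl ⟨i, hi, h⟩
      · obtain ⟨hnd, hsub⟩ := dec_col i hi
        obtain ⟨p, hp, q, hq, hne, hqp, hqq⟩ := (one_lt_pvHits_iff m _ hnd).mp h
        obtain ⟨hb1, hb2⟩ := (mem_pvR8 i).mp hi
        have hkp : p.2 = i := (hsub p hp).2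
        have hkq : q.2 = i := (hsub q hq).2
        refine Or.inr (Or.inl ⟨p, (hsub p hp).1, q, (hsub q hq).1, hne, hqp, hqq, ?_, ?_, ?_⟩)
        · show p.2 = q.2; omega
        · show (0:Int) ≤ p.2; omega
        · show p.2 ≤ 7; omega
      · obtain ⟨hnd, hsub⟩ := dec_d1 i hi
        obtain ⟨p, hp, q, hq, hne, hqp, hqq⟩ := (one_lt_pvHits_iff m _ hnd).mp h
        obtain ⟨hb1, hb2⟩ := (mem_pvR8 i).mp hi
        have hkp : p.1 - p.2 = i := (hsub p hp).2
        have hkq : q.1 - q.2 = i := (hsub q hq).2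
        refine Or.inr (Or.inr (Or.inl ⟨p, (hsub p hp).1, q, (hsub q hq).1, hne, hqp, hqq,
          ?_, ?_, ?_⟩))
        · show p.1 - p.2 = q.1 - q.2; omega
        · show (-7:Int) ≤ p.1 - p.2; omega
        · show p.1 - p.2 ≤ 7; omega
      · obtain ⟨hnd, hsub⟩ := dec_d1s i hi
        obtain ⟨p, hp, q, hq, hne, hqp, hqq⟩ := (one_lt_pvHits_iff m _ hnd).mp h
        obtain ⟨hb1, hb2⟩ := (mem_pvR8 i).mp hi
        have hkp : p.1 - p.2 = -i := (hsub p hp).2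
        have hkq : q.1 - q.2 = -i := (hsub q hq).2
        refine Or.inr (Or.inr (Or.inl ⟨p, (hsub p hp).1, q, (hsub q hq).1, hne, hqp, hqq,
          ?_, ?_, ?_⟩))
        · show p.1 - p.2 = q.1 - q.2; omega
        · show (-7:Int) ≤ p.1 - p.2; omega
        · show p.1 - p.2 ≤ 7; omega
    · have hi' := (mem_rev i).mp hi
      obtain ⟨hb1, hb2⟩ := (mem_pvR8 i).mp hi'
      rcases hc with h | h
      · obtain ⟨hnd, hsub⟩ := dec_a1 i hi'
        obtain ⟨p, hp, q, hq, hne, hqp, hqq⟩ := (one_lt_pvHits_iff m _ hnd).mp h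
        have hkp : p.1 + p.2 = 7 - i := (hsub p hp).2
        have hkq : q.1 + q.2 = 7 - i := (hsub q hq).2
        refine Or.inr (Or.inr (Or.inr ⟨p, (hsub p hp).1, q, (hsub q hq).1, hne, hqp, hqq,
          ?_, ?_, ?_⟩))
        · show p.1 + p.2 = q.1 + q.2; omega
        · show (0:Int) ≤ p.1 + p.2; omega
        · show p.1 + p.2 ≤ 7; omega
      · obtain ⟨hnd, hsub⟩ := dec_a1s i hi'
        obtain ⟨p, hp, q, hq, hne, hqp, hqq⟩ := (one_lt_pvHits_iff m _ hnd).mp h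
        have hkp : p.1 + p.2 = 7 - i := (hsub p hp).2
        have hkq : q.1 + q.2 = 7 - i := (hsub q hq).2
        refine Or.inr (Or.inr (Or.inr ⟨p, (hsub p hp).1, q, (hsub q hq).1, hne, hqp, hqq,
          ?_, ?_, ?_⟩))
        · show p.1 + p.2 = q.1 + q.2; omega
        · show (0:Int) ≤ p.1 + p.2; omega
        · show p.1 + p.2 ≤ 7; omega
  · rintro (⟨r, hr, hc⟩ | hcol | hdia | hanti)
    · exact Or.inl ⟨r, hr, Or.inl hc⟩
    · obtain ⟨p, hp, q, hq, hne, hqp, hqq, hkey, hlo, hhi⟩ := hcol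
      obtain ⟨_, _, hb3, hb4⟩ := dec_bounds p hp
      have hi : p.2 ∈ pvR8 := (mem_pvR8 _).mpr ⟨hb3, hb4⟩
      obtain ⟨hnd, _⟩ := dec_col p.2 hi
      refine Or.inl ⟨p.2, hi, Or.inr (Or.inl ((one_lt_pvHits_iff m _ hnd).mpr
        ⟨p, dec_mem_col p hp, q, ?_, hne, hqp, hqq⟩))⟩
      have hmem := dec_mem_col q hq
      have hk : p.2 = q.2 := hkey
      rwa [← hk] at hmem
    · obtain ⟨p, hp, q, hq, hne, hqp, hqq, hkey, hlo, hhi⟩ := hdia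
      obtain ⟨hb1, hb2, hb3, hb4⟩ := dec_bounds p hp
      have hk : p.1 - p.2 = q.1 - q.2 := hkey
      by_cases hd : 0 ≤ p.1 - p.2
      · have hi : p.1 - p.2 ∈ pvR8 := (mem_pvR8 _).mpr ⟨hd, by omega⟩
        obtain ⟨hnd, _⟩ := dec_d1 (p.1 - p.2) hi
        refine Or.inl ⟨p.1 - p.2, hi, Or.inr (Or.inr (Or.inl ((one_lt_pvHits_iff m _ hnd).mpr
          ⟨p, (dec_mem_d1 p hp).1 hd, q, ?_, hne, hqp, hqq⟩)))⟩
        have hmem := (dec_mem_d1 q hq).1 (by omega)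
        have hq2 : q.1 - q.2 = p.1 - p.2 := by omega
        rwa [hq2] at hmem
      · have hi : p.2 - p.1 ∈ pvR8 := (mem_pvR8 _).mpr ⟨by omega, by omega⟩
        obtain ⟨hnd, _⟩ := dec_d1s (p.2 - p.1) hi
        refine Or.inl ⟨p.2 - p.1, hi, Or.inr (Or.inr (Or.inr ((one_lt_pvHits_iff m _ hnd).mpr
          ⟨p, (dec_mem_d1 p hp).2 (by omega), q, ?_, hne, hqp, hqq⟩)))⟩
        have hmem := (dec_mem_d1 q hq).2 (by omega)
        have hq2 : q.2 - q.1 = p.2 - p.1 := by omega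
        rwa [hq2] at hmem
    · obtain ⟨p, hp, q, hq, hne, hqp, hqq, hkey, hlo, hhi⟩ := hanti
      have hk : p.1 + p.2 = q.1 + q.2 := hkey
      have hlo' : (0:Int) ≤ p.1 + p.2 := hlo
      have hhi' : p.1 + p.2 ≤ 7 := hhi
      have hi : 7 - (p.1 + p.2) ∈ pvR8 := (mem_pvR8 _).mpr ⟨by omega, by omega⟩
      obtain ⟨hnd, _⟩ := dec_a1 (7 - (p.1 + p.2)) hi
      refine Or.inr ⟨7 - (p.1 + p.2), (mem_rev _).mpr hi, Or.inl ((one_lt_pvHits_iff m _ hnd).mpr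
        ⟨p, dec_mem_a1 p hp hhi', q, ?_, hne, hqp, hqq⟩)⟩
      have hmem := dec_mem_a1 q hq (by omega)
      have hq2 : 7 - (q.1 + q.2) = 7 - (p.1 + p.2) := by omega
      rwa [hq2] at hmem

-- B-side abstraction: the three key sets built from a list L of queen cells
def pvCols (L : List (Int × Int)) : PySem.Set Int := PySem.Set.ofList (L.map Prod.snd)
def pvDias (L : List (Int × Int)) : PySem.Set Int := PySem.Set.ofList (L.map (fun q => q.1 - q.2))
def pvAntis (L : List (Int × Int)) : PySem.Set Int := PySem.Set.ofList (L.map (fun q => q.1 + q.2))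

theorem pvOfList_append (xs : List Int) (x : Int) :
    PySem.Set.ofList (xs ++ [x]) = PySem.Set.add (PySem.Set.ofList xs) x := by
  simp [PySem.Set.ofList_eq_foldl, List.foldl_append]

theorem pvContains_ofList (xs : List Int) (x : Int) :
    PySem.Set.contains (PySem.Set.ofList xs) x = true ↔ x ∈ xs := by
  rw [PySem.Set.contains_iff, PySem.Set.mem_ofList]

theorem pvClash_test (L : List (Int × Int)) (r c : Int) :
    (PySem.Set.contains (pvCols L) c || PySem.Set.contains (pvDias L) (r - c) ||
      PySem.Set.contains (pvAntis L) (r + c)) = true ↔ ∃ q ∈ L, pvClash q (r, c) := by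
  simp only [Bool.or_eq_true, pvCols, pvDias, pvAntis, pvContains_ofList, List.mem_map,
    pvClash]
  constructor
  · rintro ((⟨q, hq, hk⟩ | ⟨q, hq, hk⟩) | ⟨q, hq, hk⟩)
    · exact ⟨q, hq, Or.inl hk⟩
    · exact ⟨q, hq, Or.inr (Or.inl (by omega))⟩
    · exact ⟨q, hq, Or.inr (Or.inr (by omega))⟩
  · rintro ⟨q, hq, (hk | hk | hk)⟩
    · exact Or.inl (Or.inl ⟨q, hq, hk⟩)
    · exact Or.inl (Or.inr ⟨q, hq, by omega⟩)
    · exact Or.inr ⟨q, hq, by omega⟩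

theorem pvAdd_cell (L : List (Int × Int)) (r c : Int) :
    PySem.Set.add (pvCols L) c = pvCols (L ++ [(r, c)]) ∧
    PySem.Set.add (pvDias L) (r - c) = pvDias (L ++ [(r, c)]) ∧
    PySem.Set.add (pvAntis L) (r + c) = pvAntis (L ++ [(r, c)]) := by
  refine ⟨?_, ?_, ?_⟩ <;> simp [pvCols, pvDias, pvAntis, pvOfList_append]

def pvEr (m : List (List Int)) (r : Int) : List (Int × Int) :=
  PySem.List.enumerate (PySem.List.slice (pvRow m r) none (some 8)) 0

theorem pvEr_eq (m : List (List Int)) (r : Int) :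
    pvEr m r = PySem.List.enumerate ((pvRow m r).take 8) 0 := by
  unfold pvEr
  congr 1
  have h := PySem.List.slice_to_natCast (xs := pvRow m r) (b := 8)
  simpa using h

theorem mem_pvEr (m : List (List Int)) (r : Int) (p : Int × Int) :
    p ∈ pvEr m r ↔
      ∃ k : Nat, k < 8 ∧ k < (pvRow m r).length ∧ p = ((k : Int), (pvRow m r)[k]?.getD 0) := by
  rw [pvEr_eq, PySem.List.mem_enumerate_iff]
  constructor
  · rintro ⟨k, hk, rfl⟩
    rw [List.length_take] at hk
    have h8 : k < 8 := by omega
    have hl : k < (pvRow m r).length := by omega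
    refine ⟨k, h8, hl, ?_⟩
    simp [List.getElem_take, List.getElem?_eq_getElem hl]
  · rintro ⟨k, h8, hl, rfl⟩
    have hk : k < ((pvRow m r).take 8).length := by rw [List.length_take]; omega
    refine ⟨k, hk, ?_⟩
    simp [List.getElem_take, List.getElem?_eq_getElem hl]

theorem pvEr_queen (m : List (List Int)) (r : Int) (p : Int × Int)
    (hp : p ∈ pvEr m r) (hv : p.2 = 1) : p.1 ∈ pvR8 ∧ pvCell m r p.1 = 1 := by
  obtain ⟨k, h8, hl, rfl⟩ := (mem_pvEr m r p).mp hp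
  refine ⟨(mem_pvR8 _).mpr ⟨by omega, by omega⟩, ?_⟩
  unfold pvCell
  rw [PySem.List.pyGet?_natCast]
  exact hv

theorem pvEr_of_queen (m : List (List Int)) (r c : Int)
    (hc : c ∈ pvR8) (hq : pvCell m r c = 1) : (c, (1 : Int)) ∈ pvEr m r := by
  obtain ⟨h0, h7⟩ := (mem_pvR8 c).mp hc
  have hcast : c = ((c.toNat : Nat) : Int) := by omega
  unfold pvCell at hq
  rw [hcast, PySem.List.pyGet?_natCast] at hq
  have hl : c.toNat < (pvRow m r).length := by
    by_contra h
    rw [List.getElem?_eq_none (by omega)] at hq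
    simp at hq
  rw [mem_pvEr]
  exact ⟨c.toNat, by omega, hl, Prod.ext hcast hq.symm⟩

theorem exEr_iff (m : List (List Int)) (r : Int) (P : Int → Prop) :
    (∃ p ∈ pvEr m r, p.2 = 1 ∧ P p.1) ↔ ∃ c ∈ pvR8, pvCell m r c = 1 ∧ P c := by
  constructor
  · rintro ⟨p, hp, hv, hP⟩
    obtain ⟨h1, h2⟩ := pvEr_queen m r p hp hv
    exact ⟨p.1, h1, h2, hP⟩
  · rintro ⟨c, hc, hq, hP⟩
    exact ⟨(c, 1), pvEr_of_queen m r c hc hq, rfl, hP⟩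

theorem countP_enumerate (l : List Int) : ∀ s : Int,
    (PySem.List.enumerate l s).countP (fun p => decide (p.2 = 1)) =
      l.countP (fun v => decide (v = 1)) := by
  induction l with
  | nil => intro s; simp [PySem.List.enumerate_nil]
  | cons x xs ih =>
    intro s
    rw [PySem.List.enumerate_cons]
    simp [List.countP_cons, ih]

theorem countQ_le (m : List (List Int)) (r : Int)
    (hrc : ¬ 1 < PySem.List.count (pvRow m r) 1) :
    (pvEr m r).countP (fun p => decide (p.2 = 1)) ≤ 1 := by
  rw [pvEr_eq, countP_enumerate]
  have he : ((pvRow m r).take 8).countP (fun v => decide (v = 1)) =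
      ((pvRow m r).take 8).count 1 := by
    rw [List.count_eq_countP]
    exact List.countP_congr (fun a _ => by by_cases h : a = 1 <;> simp [h, beq_iff_eq])
  have h2 : ((pvRow m r).take 8).count 1 ≤ (pvRow m r).count 1 :=
    (List.take_sublist 8 (pvRow m r)).count_le 1
  rw [PySem.List.count_eq] at hrc
  omega

theorem bInner_no_queen (r : Int) :
    ∀ (cs : List (Int × Int)) (S1 S2 S3 : PySem.Set Int), (∀ p ∈ cs, p.2 ≠ 1) →
      bInner r cs S1 S2 S3 = some (S1, S2, S3) := by
  intro cs
  induction cs with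
  | nil => intro S1 S2 S3 _; rfl
  | cons p cs ih =>
    intro S1 S2 S3 h
    obtain ⟨c, v⟩ := p
    have hc : v ≠ 1 := h (c, v) (List.mem_cons_self)
    simp only [bInner]
    rw [if_neg hc]
    exact ih S1 S2 S3 (fun p' hp' => h p' (List.mem_cons_of_mem _ hp'))

theorem bInner_run (r : Int) :
    ∀ (cs : List (Int × Int)) (L : List (Int × Int)),
      cs.countP (fun p => decide (p.2 = 1)) ≤ 1 →
      ((bInner r cs (pvCols L) (pvDias L) (pvAntis L) = none ↔
          ∃ p ∈ cs, p.2 = 1 ∧ ∃ q ∈ L, pvClash q (r, p.1)) ∧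
        (¬(∃ p ∈ cs, p.2 = 1 ∧ ∃ q ∈ L, pvClash q (r, p.1)) →
          bInner r cs (pvCols L) (pvDias L) (pvAntis L) =
            some (pvCols (L ++ (cs.filter (fun p => decide (p.2 = 1))).map (fun p => (r, p.1))),
              pvDias (L ++ (cs.filter (fun p => decide (p.2 = 1))).map (fun p => (r, p.1))),
              pvAntis (L ++ (cs.filter (fun p => decide (p.2 = 1))).map (fun p => (r, p.1)))))) := by
  intro cs
  induction cs with
  | nil =>
    intro L _
    constructor
    · simp [bInner]
    · intro _; simp [bInner]
  | cons p cs ih =>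
    intro L hcnt
    obtain ⟨c, v⟩ := p
    by_cases hq : v = 1
    · subst hq
      have hfree : ∀ p' ∈ cs, p'.2 ≠ 1 := by
        intro p' hp' hq'
        have h1 : 0 < cs.countP (fun p => decide (p.2 = 1)) :=
          List.countP_pos_iff.mpr ⟨p', hp', by simpa using hq'⟩
        have h2 : ((c, (1:Int)) :: cs).countP (fun p => decide (p.2 = 1)) =
            cs.countP (fun p => decide (p.2 = 1)) + 1 := by
          simp [List.countP_cons]
        omega
      by_cases hcl : ∃ q ∈ L, pvClash q (r, c)
      · have htest := (pvClash_test L r c).mpr hcl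
        constructor
        · simp only [bInner, htest, if_pos, if_true, List.mem_cons, true_iff]
          exact ⟨(c, 1), Or.inl rfl, rfl, hcl⟩
        · intro hnc
          exact absurd ⟨(c, 1), List.mem_cons_self, rfl, hcl⟩ hnc
      · have htest : (PySem.Set.contains (pvCols L) c || PySem.Set.contains (pvDias L) (r - c) ||
            PySem.Set.contains (pvAntis L) (r + c)) = false := by
          rw [Bool.eq_false_iff, Ne, pvClash_test]
          exact hcl
        obtain ⟨ha1, ha2, ha3⟩ := pvAdd_cell L r c
        have hrun : bInner r ((c, 1) :: cs) (pvCols L) (pvDias L) (pvAntis L) =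
            some (pvCols (L ++ [(r, c)]), pvDias (L ++ [(r, c)]), pvAntis (L ++ [(r, c)])) := by
          simp only [bInner, htest, if_pos, Bool.false_eq_true, if_false, ha1, ha2, ha3]
          exact bInner_no_queen r cs _ _ _ hfree
        have hfilter : ((c, (1:Int)) :: cs).filter (fun p => decide (p.2 = 1)) = [(c, 1)] := by
          simp only [List.filter_cons, decide_true, if_pos]
          rw [List.filter_eq_nil_iff.mpr (fun p' hp' => by simpa using hfree p' hp')]
        constructor
        · rw [hrun]
          simp only [List.mem_cons, reduceCtorEq, false_iff]
          rintro ⟨p', (rfl | hp'), hq', hcl'⟩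
          · exact hcl hcl'
          · exact hfree p' hp' hq'
        · intro _
          rw [hrun, hfilter]
          simp
    · have hcnt' : cs.countP (fun p => decide (p.2 = 1)) ≤ 1 := by
        have : ((c, v) :: cs).countP (fun p => decide (p.2 = 1)) =
            cs.countP (fun p => decide (p.2 = 1)) := by
          simp [List.countP_cons, hq]
        omega
      obtain ⟨ih1, ih2⟩ := ih L hcnt'
      have hstep : bInner r ((c, v) :: cs) (pvCols L) (pvDias L) (pvAntis L) =
          bInner r cs (pvCols L) (pvDias L) (pvAntis L) := by
        simp only [bInner]
        rw [if_neg hq]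
      have hfilter : ((c, v) :: cs).filter (fun p => decide (p.2 = 1)) =
          cs.filter (fun p => decide (p.2 = 1)) := by
        simp [List.filter_cons, hq]
      constructor
      · rw [hstep, ih1]
        simp only [List.mem_cons]
        constructor
        · rintro ⟨p', hp', h⟩; exact ⟨p', Or.inr hp', h⟩
        · rintro ⟨p', (rfl | hp'), h⟩
          · exact absurd h.1 hq
          · exact ⟨p', hp', h⟩
      · intro hnc
        rw [hstep, hfilter]
        apply ih2
        rintro ⟨p', hp', h⟩
        exact hnc ⟨p', List.mem_cons_of_mem _ hp', h⟩

-- membership in the per-row queen-cell list appended to L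
theorem mem_rowE (m : List (List Int)) (r : Int) (q : Int × Int) :
    q ∈ ((pvEr m r).filter (fun p => decide (p.2 = 1))).map (fun p => (r, p.1)) ↔
      q.1 = r ∧ q.2 ∈ pvR8 ∧ pvCell m r q.2 = 1 := by
  simp only [List.mem_map, List.mem_filter, decide_eq_true_eq]
  constructor
  · rintro ⟨p, ⟨hp, hv⟩, rfl⟩
    obtain ⟨h1, h2⟩ := pvEr_queen m r p hp hv
    exact ⟨rfl, h1, h2⟩
  · rintro ⟨h1, h2, h3⟩
    refine ⟨(q.2, 1), ⟨pvEr_of_queen m r q.2 h2 h3, rfl⟩, ?_⟩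
    rw [← h1]

theorem pvClash_symm (p q : Int × Int) (h : pvClash p q) : pvClash q p := by
  unfold pvClash at *
  omega

theorem bOuter_false_iff (m : List (List Int)) :
    ∀ (rs : List Int) (L : List (Int × Int)), rs.Nodup → (∀ r ∈ rs, r ∈ pvR8) →
      (bOuter m rs (pvCols L) (pvDias L) (pvAntis L) = false ↔
        (∃ r ∈ rs, 1 < PySem.List.count (pvRow m r) 1) ∨
        (∃ r ∈ rs, ∃ c ∈ pvR8, pvCell m r c = 1 ∧
          ((∃ q ∈ L, pvClash q (r, c)) ∨
            (∃ r' ∈ rs, r' ≠ r ∧ ∃ c' ∈ pvR8, pvCell m r' c' = 1 ∧ pvClash (r', c') (r, c))))) := by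
  intro rs
  induction rs with
  | nil => simp [bOuter]
  | cons r rs ih =>
    intro L hnd hmem
    obtain ⟨hrnotin, hnd'⟩ := List.nodup_cons.mp hnd
    have hmem' : ∀ r' ∈ rs, r' ∈ pvR8 := fun r' h => hmem r' (List.mem_cons_of_mem _ h)
    by_cases hrow : 1 < PySem.List.count (pvRow m r) 1
    · simp only [bOuter, hrow, if_pos, List.mem_cons, true_iff]
      exact Or.inl ⟨r, Or.inl rfl, hrow⟩
    · have hle := countQ_le m r hrow
      obtain ⟨hnone, hsome⟩ := bInner_run r (pvEr m r) L hle
      have hEr : PySem.List.enumerate (PySem.List.slice (pvRow m r) none (some 8)) 0 = pvEr m r := rfl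
      by_cases hcl : ∃ c ∈ pvR8, pvCell m r c = 1 ∧ ∃ q ∈ L, pvClash q (r, c)
      · have h1 := hnone.mpr ((exEr_iff m r _).mpr hcl)
        simp only [bOuter, hrow, if_neg, not_false_iff, hEr, h1, List.mem_cons, true_iff]
        obtain ⟨c, hc, hq, hclq⟩ := hcl
        exact Or.inr ⟨r, Or.inl rfl, c, hc, hq, Or.inl hclq⟩
      · have h1 := hsome (fun hex => hcl ((exEr_iff m r _).mp hex))
        have hstep : bOuter m (r :: rs) (pvCols L) (pvDias L) (pvAntis L) =
            bOuter m rs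
              (pvCols (L ++ ((pvEr m r).filter (fun p => decide (p.2 = 1))).map (fun p => (r, p.1))))
              (pvDias (L ++ ((pvEr m r).filter (fun p => decide (p.2 = 1))).map (fun p => (r, p.1))))
              (pvAntis (L ++ ((pvEr m r).filter (fun p => decide (p.2 = 1))).map (fun p => (r, p.1)))) := by
          simp only [bOuter, hrow, if_neg, not_false_iff, hEr, h1]
        rw [hstep, ih _ hnd' hmem']
        constructor
        · rintro (⟨r2, hr2, h⟩ | ⟨r2, hr2, c2, hc2, hq2, (⟨q, hqm, hclq⟩ | ⟨r3, hr3, hne3, c3, hc3, hq3, hcl3⟩)⟩)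
          · exact Or.inl ⟨r2, List.mem_cons_of_mem _ hr2, h⟩
          · rcases List.mem_append.mp hqm with hqL | hqE
            · exact Or.inr ⟨r2, List.mem_cons_of_mem _ hr2, c2, hc2, hq2, Or.inl ⟨q, hqL, hclq⟩⟩
            · obtain ⟨hq1, hq2', hq3'⟩ := (mem_rowE m r q).mp hqE
              refine Or.inr ⟨r2, List.mem_cons_of_mem _ hr2, c2, hc2, hq2,
                Or.inr ⟨r, List.mem_cons_self, ?_, q.2, hq2', ?_, ?_⟩⟩
              · intro he; rw [he] at hrnotin; exact hrnotin hr2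
              · exact hq3'
              · have hqe : (r, q.2) = q := by rw [← hq1]
                rw [hqe]; exact hclq
          · exact Or.inr ⟨r2, List.mem_cons_of_mem _ hr2, c2, hc2, hq2,
              Or.inr ⟨r3, List.mem_cons_of_mem _ hr3, hne3, c3, hc3, hq3, hcl3⟩⟩
        · rintro (⟨r2, hr2, h⟩ | ⟨r2, hr2, c2, hc2, hq2, (⟨q, hqL, hclq⟩ | ⟨r3, hr3, hne3, c3, hc3, hq3, hcl3⟩)⟩)
          · rcases List.mem_cons.mp hr2 with rfl | hr2'
            · exact absurd h hrow
            · exact Or.inl ⟨r2, hr2', h⟩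
          · rcases List.mem_cons.mp hr2 with rfl | hr2'
            · exact absurd ⟨c2, hc2, hq2, q, hqL, hclq⟩ hcl
            · exact Or.inr ⟨r2, hr2', c2, hc2, hq2, Or.inl ⟨q, List.mem_append_left _ hqL, hclq⟩⟩
          · rcases List.mem_cons.mp hr2 with rfl | hr2'
            · rcases List.mem_cons.mp hr3 with rfl | hr3'
              · exact absurd rfl hne3
              · refine Or.inr ⟨r3, hr3', c3, hc3, hq3, Or.inl ⟨(r2, c2), ?_, pvClash_symm _ _ hcl3⟩⟩
                exact List.mem_append_right _ ((mem_rowE m r2 (r2, c2)).mpr ⟨rfl, hc2, hq2⟩)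
            · rcases List.mem_cons.mp hr3 with rfl | hr3'
              · refine Or.inr ⟨r2, hr2', c2, hc2, hq2, Or.inl ⟨(r3, c3), ?_, hcl3⟩⟩
                exact List.mem_append_right _ ((mem_rowE m r3 (r3, c3)).mpr ⟨rfl, hc3, hq3⟩)
              · exact Or.inr ⟨r2, hr2', c2, hc2, hq2,
                  Or.inr ⟨r3, hr3', hne3, c3, hc3, hq3, hcl3⟩⟩

theorem validacion_alt_false_iff (m : List (List Int)) :
    validacion_alt m = false ↔ pvX m ∨ pvPairConf m (fun p => p.1 + p.2) 8 14 := by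
  have h1 : validacion_alt m = false ↔ _ :=
    bOuter_false_iff m pvR8 [] (by decide) (fun r h => h)
  rw [h1]
  unfold pvX pvRowCnt pvPairConf
  constructor
  · rintro (⟨r, hr, h⟩ | ⟨r, hr, c, hc, hq, (⟨q, hqm, _⟩ | ⟨r', hr', hne', c', hc', hq', hcl⟩)⟩)
    · exact Or.inl (Or.inl ⟨r, hr, h⟩)
    · exact absurd hqm (List.not_mem_nil)
    · have hpm : (r, c) ∈ pvCells := (mem_pvCells _).mpr ⟨hr, hc⟩
      have hpm' : (r', c') ∈ pvCells := (mem_pvCells _).mpr ⟨hr', hc'⟩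
      obtain ⟨b1, b2, b3, b4⟩ := dec_bounds _ hpm
      obtain ⟨b5, b6, b7, b8⟩ := dec_bounds _ hpm'
      have hnepq : (r', c') ≠ (r, c) := by
        intro he
        exact hne' (congrArg Prod.fst he)
      rcases hcl with hk | hk | hk
      · refine Or.inl (Or.inr (Or.inl ⟨(r', c'), hpm', (r, c), hpm, hnepq, hq', hq, ?_, ?_, ?_⟩))
        · exact hk
        · show (0:Int) ≤ c'; omega
        · show (c':Int) ≤ 7; omega
      · refine Or.inl (Or.inr (Or.inr (Or.inl ⟨(r', c'), hpm', (r, c), hpm, hnepq, hq', hq, ?_, ?_, ?_⟩)))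
        · exact hk
        · show (-7:Int) ≤ r' - c'; omega
        · show (r':Int) - c' ≤ 7; omega
      · by_cases hs : r' + c' ≤ 7
        · refine Or.inl (Or.inr (Or.inr (Or.inr ⟨(r', c'), hpm', (r, c), hpm, hnepq, hq', hq, ?_, ?_, ?_⟩)))
          · exact hk
          · show (0:Int) ≤ r' + c'; omega
          · show (r':Int) + c' ≤ 7; omega
        · refine Or.inr ⟨(r', c'), hpm', (r, c), hpm, hnepq, hq', hq, ?_, ?_, ?_⟩
          · exact hk
          · show (8:Int) ≤ r' + c'; omega
          · show (r':Int) + c' ≤ 14; omega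
  · have pairCase : ∀ (p q : Int × Int), p ∈ pvCells → q ∈ pvCells → p ≠ q →
        pvQueen m p → pvQueen m q → pvClash p q →
        (∃ r ∈ pvR8, 1 < PySem.List.count (pvRow m r) 1) ∨
        (∃ r ∈ pvR8, ∃ c ∈ pvR8, pvCell m r c = 1 ∧
          ((∃ q' ∈ ([] : List (Int × Int)), pvClash q' (r, c)) ∨
            (∃ r' ∈ pvR8, r' ≠ r ∧ ∃ c' ∈ pvR8, pvCell m r' c' = 1 ∧ pvClash (r', c') (r, c)))) := by
      intro p q hp hq hne hqp hqq hcl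
      obtain ⟨hp1, hp2⟩ := (mem_pvCells p).mp hp
      obtain ⟨hq1, hq2⟩ := (mem_pvCells q).mp hq
      have hrne : p.1 ≠ q.1 := by
        intro he
        apply hne
        have h2 : p.2 = q.2 := by unfold pvClash at hcl; omega
        exact Prod.ext he h2
      refine Or.inr ⟨q.1, hq1, q.2, hq2, hqq, Or.inr ⟨p.1, hp1, hrne, p.2, hp2, hqp, ?_⟩⟩
      simpa using hcl
    rintro ((⟨r, hr, h⟩ | ⟨p, hp, q, hq, hne, hqp, hqq, hk, _, _⟩ |
        ⟨p, hp, q, hq, hne, hqp, hqq, hk, _, _⟩ | ⟨p, hp, q, hq, hne, hqp, hqq, hk, _, _⟩) |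
        ⟨p, hp, q, hq, hne, hqp, hqq, hk, _, _⟩)
    · exact Or.inl ⟨r, hr, h⟩
    · exact pairCase p q hp hq hne hqp hqq (Or.inl hk)
    · exact pairCase p q hp hq hne hqp hqq (Or.inr (Or.inl hk))
    · exact pairCase p q hp hq hne hqp hqq (Or.inr (Or.inr hk))
    · exact pairCase p q hp hq hne hqp hqq (Or.inr (Or.inr hk))

-- the queens list pvQs, relative to the proof-side grid pvCells
theorem pvCells_eq : (PySem.List.pyRange 0 8 1).product (PySem.List.pyRange 0 8 1) = pvCells := by
  decide

theorem pvQs_eq (m : List (List Int)) :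
    pvQs m = pvCells.filter fun p => pvCell m p.1 p.2 == 1 := by
  unfold pvQs
  rw [pvCells_eq]

theorem nodup_pvCells : pvCells.Nodup := by decide

theorem nodup_pvQs (m : List (List Int)) : (pvQs m).Nodup := by
  rw [pvQs_eq]
  exact nodup_pvCells.filter _

theorem mem_pvQs (m : List (List Int)) (p : Int × Int) :
    p ∈ pvQs m ↔ p ∈ pvCells ∧ pvQueen m p := by
  rw [pvQs_eq]
  simp [List.mem_filter, pvQueen]

theorem pairs_of_not_pairwise {α : Type} (l : List α) (hnd : l.Nodup)
    (R : α → α → Prop) (hsymm : ∀ p q, R p q → R q p) :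
    (¬ l.Pairwise R) ↔ ∃ p ∈ l, ∃ q ∈ l, p ≠ q ∧ ¬ R p q := by
  rw [List.pairwise_iff_getElem]
  push_neg
  constructor
  · rintro ⟨i, j, hi, hj, hij, hR⟩
    refine ⟨l[i], List.getElem_mem _, l[j], List.getElem_mem _, ?_, hR⟩
    intro he
    have := (List.Nodup.getElem_inj_iff hnd).mp he
    omega
  · rintro ⟨p, hp, q, hq, hne, hnR⟩
    obtain ⟨i, hi, rfl⟩ := List.mem_iff_getElem.mp hp
    obtain ⟨j, hj, rfl⟩ := List.mem_iff_getElem.mp hq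
    rcases Nat.lt_trichotomy i j with h | h | h
    · exact ⟨i, j, hi, hj, h, hnR⟩
    · subst h
      exact absurd rfl hne
    · exact ⟨j, i, hj, hi, h, fun hR => hnR (hsymm _ _ hR)⟩

theorem pairwise_mem {α : Type} (l : List α) (hnd : l.Nodup)
    (R : α → α → Prop) (hsymm : ∀ p q, R p q → R q p) (hpw : l.Pairwise R)
    {p q : α} (hp : p ∈ l) (hq : q ∈ l) (hne : p ≠ q) : R p q := by
  by_contra h
  exact (pairs_of_not_pairwise l hnd R hsymm).mpr ⟨p, hp, q, hq, hne, h⟩ hpw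

theorem pvPOk_symm : ∀ p q : Int × Int,
    (p.2 ≠ q.2 ∧ p.1 + q.2 ≠ q.1 + p.2 ∧ (p.1 + p.2 ≠ q.1 + q.2 ∨ 8 ≤ p.1 + p.2)) →
    (q.2 ≠ p.2 ∧ q.1 + p.2 ≠ p.1 + q.2 ∧ (q.1 + q.2 ≠ p.1 + p.2 ∨ 8 ≤ q.1 + q.2)) := by
  intro p q h
  obtain ⟨h1, h2, h3⟩ := h
  refine ⟨by omega, by omega, ?_⟩
  rcases h3 with h | h
  · exact Or.inl (by omega)
  · by_cases hs : q.1 + q.2 = p.1 + p.2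
    · exact Or.inr (by omega)
    · exact Or.inl hs

theorem pvSum_symm : ∀ p q : Int × Int,
    (p.1 + p.2 ≠ q.1 + q.2) → (q.1 + q.2 ≠ p.1 + p.2) := by
  intro p q h
  omega

theorem rowOK_iff (m : List (List Int)) :
    (∀ f ∈ m.take 8, f.count 1 ≤ 1) ↔ ¬ pvRowConf m := by
  unfold pvRowConf
  push_neg
  rfl

theorem pvRowConf_iff (m : List (List Int)) :
    pvRowConf m ↔ pvRowCnt m := by
  unfold pvRowConf pvRowCnt
  constructor
  · rintro ⟨fila, hmem, hcnt⟩
    obtain ⟨k, hk, heq⟩ := List.mem_iff_getElem.mp hmem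
    have hkl : k < 8 ∧ k < m.length := by
      have h1 : (m.take 8).length = min 8 m.length := List.length_take
      have h2 := hk
      omega
    refine ⟨(k : Int), (mem_pvR8 _).mpr ⟨by omega, by omega⟩, ?_⟩
    have hrow : pvRow m (k : Int) = fila := by
      unfold pvRow
      rw [PySem.List.pyGet?_natCast, List.getElem?_eq_getElem hkl.2]
      simp only [Option.getD_some]
      rw [← heq]
      exact (List.getElem_take).symm
    rw [hrow, PySem.List.count_eq]
    exact hcnt
  · rintro ⟨r, hr, hcnt⟩
    obtain ⟨h0, h7⟩ := (mem_pvR8 r).mp hr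
    have hcast : r = ((r.toNat : Nat) : Int) := by omega
    have hrow : pvRow m r = (m[r.toNat]?).getD [] := by
      unfold pvRow
      rw [hcast, PySem.List.pyGet?_natCast]
      have hnn : ((r.toNat : Int)).toNat = r.toNat := by omega
      rw [hnn]
    by_cases hlt : r.toNat < m.length
    · have hg : m[r.toNat]? = some m[r.toNat] := List.getElem?_eq_getElem hlt
      have hmem : m[r.toNat] ∈ m.take 8 := by
        have h8 : r.toNat < (m.take 8).length := by simp; omega
        have heq : (m.take 8)[r.toNat] = m[r.toNat] := List.getElem_take
        rw [← heq]
        exact List.getElem_mem h8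
      refine ⟨m[r.toNat], hmem, ?_⟩
      rw [PySem.List.count_eq, hrow, hg] at hcnt
      simpa using hcnt
    · exfalso
      rw [PySem.List.count_eq, hrow, List.getElem?_eq_none (by omega)] at hcnt
      simp at hcnt

theorem pvX_iff (m : List (List Int)) :
    (pvRowConf m ∨ pvPairConf m Prod.snd 0 7 ∨
      pvPairConf m (fun p => p.1 - p.2) (-7) 7 ∨ pvPairConf m (fun p => p.1 + p.2) 0 7) ↔
      pvX m := by
  unfold pvX
  rw [pvRowConf_iff m]

-- ===== VERDICT (by name: the statement is the Claim_ definition above) =====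
theorem validacion_spec : Claim_unchanged_validacion := by
  intro m _hdom _hpre
  unfold Spec_validacion
  intro hnd
  have hA := validacion_false_iff m
  have hB := validacion_alt_false_iff m
  cases hAv : validacion m <;> cases hBv : validacion_alt m
  · rfl
  · have hx : pvX m := hA.mp hAv
    have := hB.mpr (Or.inl hx)
    rw [this] at hBv
    cases hBv
  · rcases hB.mp hBv with hx | hH
    · rw [hA.mpr hx] at hAv
      cases hAv
    · exfalso
      have hnX : ¬ pvX m := by
        intro hx
        rw [hA.mpr hx] at hAv
        cases hAv
      apply hnd
      unfold D_validacion
      refine ⟨?_, ?_, ?_⟩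
      · exact (rowOK_iff m).mpr (fun hrc => hnX ((pvX_iff m).mp (Or.inl hrc)))
      · by_contra hnp
        obtain ⟨p, hp, q, hq, hne, hnR⟩ :=
          (pairs_of_not_pairwise _ (nodup_pvQs m) _ pvPOk_symm).mp hnp
        obtain ⟨hpc, hpq⟩ := (mem_pvQs m p).mp hp
        obtain ⟨hqc, hqq⟩ := (mem_pvQs m q).mp hq
        obtain ⟨b1, b2, b3, b4⟩ := dec_bounds p hpc
        obtain ⟨b5, b6, b7, b8⟩ := dec_bounds q hqc
        apply hnX
        apply (pvX_iff m).mp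
        by_cases h1 : p.2 = q.2
        · exact Or.inr (Or.inl ⟨p, hpc, q, hqc, hne, hpq, hqq, h1, by omega, by omega⟩)
        · by_cases h2 : p.1 - p.2 = q.1 - q.2
          · refine Or.inr (Or.inr (Or.inl ⟨p, hpc, q, hqc, hne, hpq, hqq, h2, ?_, ?_⟩))
            · show (-7:Int) ≤ p.1 - p.2; omega
            · show p.1 - p.2 ≤ 7; omega
          · have h3 : p.1 + p.2 = q.1 + q.2 ∧ p.1 + p.2 ≤ 7 := by
              by_contra h4
              apply hnR
              refine ⟨h1, fun hd => h2 (by omega), ?_⟩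
              by_cases hs : p.1 + p.2 = q.1 + q.2
              · push_neg at h4
                exact Or.inr (by have := h4 hs; omega)
              · exact Or.inl hs
            refine Or.inr (Or.inr (Or.inr ⟨p, hpc, q, hqc, hne, hpq, hqq, h3.1, ?_, h3.2⟩))
            show (0:Int) ≤ p.1 + p.2; omega
      · obtain ⟨p, hpc, q, hqc, hne, hqp, hqq, hk, hlo, hhi⟩ := hH
        exact (pairs_of_not_pairwise _ (nodup_pvQs m) _ pvSum_symm).mpr
          ⟨p, (mem_pvQs m p).mpr ⟨hpc, hqp⟩, q, (mem_pvQs m q).mpr ⟨hqc, hqq⟩, hne,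
            fun hns => hns hk⟩
  · rfl

set_option maxRecDepth 10000 in
theorem validacion_changed : Claim_changed_validacion := by
  unfold Claim_changed_validacion; decide

theorem validacion_tight : Claim_exact_validacion := by
  intro m _hdom _hpre hD
  unfold D_validacion at hD
  obtain ⟨hrow, hpw, hns⟩ := hD
  obtain ⟨p, hp, q, hq, hne, hnR⟩ :=
    (pairs_of_not_pairwise _ (nodup_pvQs m) _ pvSum_symm).mp hns
  have hk : p.1 + p.2 = q.1 + q.2 := not_ne_iff.mp hnR
  obtain ⟨h1, h2, h3⟩ := pairwise_mem _ (nodup_pvQs m) _ pvPOk_symm hpw hp hq hne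
  have hhigh : 8 ≤ p.1 + p.2 := by
    rcases h3 with h | h
    · exact absurd hk h
    · exact h
  obtain ⟨hpc, hpq⟩ := (mem_pvQs m p).mp hp
  obtain ⟨hqc, hqq⟩ := (mem_pvQs m q).mp hq
  obtain ⟨b1, b2, b3, b4⟩ := dec_bounds p hpc
  have hBf : validacion_alt m = false :=
    (validacion_alt_false_iff m).mpr
      (Or.inr ⟨p, hpc, q, hqc, hne, hpq, hqq, hk, hhigh, by show p.1 + p.2 ≤ 14; omega⟩)
  have hAt : validacion m = true := by
    cases hAv : validacion m
    · exfalso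
      rcases (pvX_iff m).mpr ((validacion_false_iff m).mp hAv) with hrc | hcol | hdia | hlow
      · exact (rowOK_iff m).mp hrow hrc
      · obtain ⟨a, hac, b, hbc, hne', hqa, hqb, hk', _, _⟩ := hcol
        obtain ⟨g1, _, _⟩ := pairwise_mem _ (nodup_pvQs m) _ pvPOk_symm hpw
          ((mem_pvQs m a).mpr ⟨hac, hqa⟩) ((mem_pvQs m b).mpr ⟨hbc, hqb⟩) hne'
        exact g1 hk'
      · obtain ⟨a, hac, b, hbc, hne', hqa, hqb, hk', _, _⟩ := hdia
        obtain ⟨_, g2, _⟩ := pairwise_mem _ (nodup_pvQs m) _ pvPOk_symm hpw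
          ((mem_pvQs m a).mpr ⟨hac, hqa⟩) ((mem_pvQs m b).mpr ⟨hbc, hqb⟩) hne'
        have hd : a.1 - a.2 = b.1 - b.2 := hk'
        exact g2 (by omega)
      · obtain ⟨a, hac, b, hbc, hne', hqa, hqb, hk', hlo', hhi'⟩ := hlow
        obtain ⟨_, _, g3⟩ := pairwise_mem _ (nodup_pvQs m) _ pvPOk_symm hpw
          ((mem_pvQs m a).mpr ⟨hac, hqa⟩) ((mem_pvQs m b).mpr ⟨hbc, hqb⟩) hne'
        have hs : a.1 + a.2 = b.1 + b.2 := hk'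
        have hh : a.1 + a.2 ≤ 7 := hhi'
        rcases g3 with h | h
        · exact h hs
        · omega
    · rfl
  rw [hAt, hBf]
  exact fun h => Bool.noConfusion h
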